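-- pv_equiv track=rewrite | github.com/yaejinpark/python-lc | codewars/python_mhardy/7kyu_dominant_array_elements_mhardy.py | solve
-- ===== SOURCE A (Python) =====
-- def solve(arr):
--     res = []
--     for i in range(len(arr)-1):
--         temp = arr[i:]
--         if temp[0] == max(temp) and temp[0] not in res:
--             res.append(temp[0])
--     if arr[-1] not in res:
--         res.append(arr[-1])
--     return res
-- ===== SOURCE B (Python) =====
-- def solve(arr):
--     # one right-to-left pass: keep elements >= max of everything to their right
--     keep = []
--     m = None
--     for x in reversed(arr):
--         if m is None or x >= m:
--             keep.append(x)
--             m = x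
--     # dedup in left-to-right order, keeping first occurrences
--     seen = set()
--     out = []
--     for x in reversed(keep):
--         if x not in seen:
--             seen.add(x)
--             out.append(x)
--     return out
-- ===== Notes on version B (the rewrite author's own statement) =====
-- stated objective: faster
-- what changed: Replaces the O(n^2) loop that recomputes max(arr[i:]) for every index with a single right-to-left pass maintaining a running suffix maximum, followed by an order-preserving dedup using a set instead of repeated 'in res' list scans.
import Mathlib
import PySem

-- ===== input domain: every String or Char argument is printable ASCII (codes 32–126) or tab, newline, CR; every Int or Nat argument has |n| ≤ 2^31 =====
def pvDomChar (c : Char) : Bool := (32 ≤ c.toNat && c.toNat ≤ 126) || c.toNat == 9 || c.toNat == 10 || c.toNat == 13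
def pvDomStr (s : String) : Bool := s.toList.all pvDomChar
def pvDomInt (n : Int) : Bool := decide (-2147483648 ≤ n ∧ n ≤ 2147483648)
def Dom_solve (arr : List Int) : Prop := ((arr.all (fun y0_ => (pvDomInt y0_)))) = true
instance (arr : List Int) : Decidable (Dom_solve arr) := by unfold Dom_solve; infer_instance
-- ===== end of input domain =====

-- B replaces A's per-index max(arr[i:]) rescans with one right-to-left suffix-maximum pass plus a set-based dedup (asymptotically faster).

-- ===== PORT A =====
def solve (arr : List Int) : List Int :=
  let res := (PySem.List.pyRange 0 ((arr.length : Int) - 1) 1).foldl (fun res i =>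
    let temp := PySem.List.slice arr (some i) none
    match PySem.List.pyGet? temp 0, PySem.List.max? temp (fun y => y) with
    | some t0, some m => if t0 = m ∧ t0 ∉ res then res ++ [t0] else res
    | _, _ => res) []
  match PySem.List.pyGet? arr (-1) with
  | some last => if last ∉ res then res ++ [last] else res
  | none => res   -- empty list: Python raises IndexError here; excluded by Pre_solve

-- ===== PORT B =====
def solve_alt (arr : List Int) : List Int :=
  let p := arr.reverse.foldl (fun (p : List Int × Option Int) x =>
    match p.2 with
    | none => (p.1 ++ [x], some x)
    | some m => if m ≤ x then (p.1 ++ [x], some x) else p) ([], none)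
  let q := p.1.reverse.foldl (fun (q : List Int × PySem.Set Int) x =>
    if PySem.Set.contains q.2 x then q else (q.1 ++ [x], PySem.Set.add q.2 x))
    (([] : List Int), PySem.Set.empty)
  q.1

-- ===== PRECONDITION & SPEC =====
-- Pre_ excludes only the empty list, on which Python A raises IndexError indexing the last element.
def Pre_solve (arr : List Int) : Prop := arr ≠ []
instance (arr : List Int) : Decidable (Pre_solve arr) := by unfold Pre_solve; infer_instance
def pvWitness_solve : List Int := [3, 1, 3, 2]

def Spec_solve (arr : List Int) (out : List Int) : Prop := out = solve_alt arr
instance (arr : List Int) (out : List Int) : Decidable (Spec_solve arr out) := by unfold Spec_solve; infer_instance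

-- ===== CLAIM (what is proved, stated in full; the proofs are below) =====
def Claim_equal_solve : Prop := ∀ (arr : List Int), Dom_solve arr → Pre_solve arr → Spec_solve arr (solve arr)

-- ===== LEMMAS AND PROOFS =====

-- the list of "dominant" values of arr in index order (x at index i with x = max(arr[i:]))
def domL : List Int → List Int
  | [] => []
  | x :: xs => if xs.all (fun y => decide (y ≤ x)) then x :: domL xs else domL xs

-- the dominant values excluding the last index (what A's range(len-1) loop sees)
def domFront : List Int → List Int
  | [] => []
  | [_] => []
  | x :: y :: t =>
      if (y :: t).all (fun z => decide (z ≤ x)) then x :: domFront (y :: t) else domFront (y :: t)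

-- order-preserving dedup fold shared by both characterizations
def ded (res : List Int) (l : List Int) : List Int :=
  l.foldl (fun res x => if x ∈ res then res else res ++ [x]) res

-- running maximum, shaped for B's left-cons induction
def maxO : List Int → Option Int
  | [] => none
  | x :: xs => some (match maxO xs with | none => x | some m => max x m)

theorem maxO_eq_none {xs : List Int} : maxO xs = none ↔ xs = [] := by
  cases xs <;> simp [maxO]

theorem maxO_spec {xs : List Int} {m : Int} (h : maxO xs = some m) :
    m ∈ xs ∧ ∀ y ∈ xs, y ≤ m := by
  induction xs generalizing m with
  | nil => simp [maxO] at h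
  | cons x t ih =>
    simp only [maxO] at h
    cases ht : maxO t with
    | none =>
      rw [ht] at h; rw [maxO_eq_none] at ht
      subst ht; simp at h; simp [h]
    | some m' =>
      rw [ht] at h
      obtain ⟨hmem, hle⟩ := ih ht
      simp only [Option.some_inj] at h
      constructor
      · rcases max_choice x m' with hc | hc <;> simp [← h, hc, hmem]
      · intro y hy
        rcases List.mem_cons.mp hy with rfl | hy
        · rw [← h]; exact le_max_left _ _
        · rw [← h]; exact le_trans (hle y hy) (le_max_right _ _)

theorem foldl_max_eq_self_iff (x : Int) (t : List Int) :
    x = t.foldl max x ↔ ∀ y ∈ t, y ≤ x := by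
  constructor
  · intro h y hy
    rw [h]; exact (PySem.List.le_foldl_max t x).2 y hy
  · intro h
    rcases PySem.List.foldl_max_mem t x with hc | hc
    · exact hc.symm
    · exact le_antisymm (PySem.List.le_foldl_max t x).1 (h _ hc)

theorem domL_eq_front (arr : List Int) (h : arr ≠ []) :
    domL arr = domFront arr ++ [arr.getLast h] := by
  induction arr with
  | nil => exact absurd rfl h
  | cons x xs ih =>
    cases xs with
    | nil => simp [domL, domFront]
    | cons y t =>
      have hne : (y :: t) ≠ [] := by simp
      have ihy := ih hne
      rw [List.getLast_cons hne]
      by_cases hc : ((y :: t).all (fun z => decide (z ≤ x))) = true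
      · rw [show domL (x :: y :: t) = x :: domL (y :: t) from by rw [domL, if_pos hc],
          show domFront (x :: y :: t) = x :: domFront (y :: t) from by
            rw [domFront.eq_3, if_pos hc], ihy, List.cons_append]
      · rw [show domL (x :: y :: t) = domL (y :: t) from by rw [domL, if_neg hc],
          show domFront (x :: y :: t) = domFront (y :: t) from by
            rw [domFront.eq_3, if_neg hc], ihy]

theorem ded_append (res l1 l2 : List Int) : ded res (l1 ++ l2) = ded (ded res l1) l2 := by
  simp [ded, List.foldl_append]

-- A's loop over range(len(arr)-1) is the dedup fold over domFront arr
theorem loopA_eq (arr : List Int) (res : List Int) :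
    (PySem.List.pyRange 0 ((arr.length : Int) - 1) 1).foldl (fun res i =>
      let temp := PySem.List.slice arr (some i) none
      match PySem.List.pyGet? temp 0, PySem.List.max? temp (fun y => y) with
      | some t0, some m => if t0 = m ∧ t0 ∉ res then res ++ [t0] else res
      | _, _ => res) res = ded res (domFront arr) := by
  induction arr generalizing res with
  | nil =>
    rw [PySem.List.pyRange_one_eq_nil (by simp)]
    simp [ded, domFront]
  | cons x xs ih =>
    cases xs with
    | nil =>
      rw [show ((([x] : List Int).length : Int) - 1) = 0 by simp,
        PySem.List.pyRange_one_eq_nil (by omega)]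
      simp [ded, domFront]
    | cons y t =>
      -- peel off index 0, then shift the remaining indices down onto (y :: t)
      have hlen : (0 : Int) < ((x :: y :: t).length : Int) - 1 := by
        simp only [List.length_cons]; push_cast; omega
      rw [PySem.List.pyRange_one_cons hlen]
      simp only [List.foldl_cons]
      -- the i = 0 step
      have h0 : PySem.List.slice (x :: y :: t) (some 0) none = x :: y :: t := by
        simp [PySem.List.slice_zero_start, PySem.List.slice_none_none]
      rw [h0]
      rw [PySem.List.pyGet?_zero_cons, PySem.List.max?_id_cons]
      have hcond : (x = (y :: t).foldl max x) ↔ ((y :: t).all (fun z => decide (z ≤ x)) = true) := by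
        rw [foldl_max_eq_self_iff]; simp
      -- the remaining indices: pyRange 1 n ≅ pyRange 0 (n-1) over (y :: t)
      set res1 := (if x = (y :: t).foldl max x ∧ x ∉ res then res ++ [x] else res) with hres1
      have hshift : (PySem.List.pyRange (0 + 1) (((x :: y :: t).length : Int) - 1) 1).foldl
          (fun res i =>
            let temp := PySem.List.slice (x :: y :: t) (some i) none
            match PySem.List.pyGet? temp 0, PySem.List.max? temp (fun y => y) with
            | some t0, some m => if t0 = m ∧ t0 ∉ res then res ++ [t0] else res
            | _, _ => res) res1
          = (PySem.List.pyRange 0 (((y :: t).length : Int) - 1) 1).foldl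
          (fun res i =>
            let temp := PySem.List.slice (y :: t) (some i) none
            match PySem.List.pyGet? temp 0, PySem.List.max? temp (fun y => y) with
            | some t0, some m => if t0 = m ∧ t0 ∉ res then res ++ [t0] else res
            | _, _ => res) res1 := by
        rw [PySem.List.pyRange_one, PySem.List.pyRange_one, List.foldl_map, List.foldl_map]
        have hn : ((((x :: y :: t).length : Int) - 1) - (0 + 1)).toNat
            = ((((y :: t).length : Int) - 1) - 0).toNat := by
          simp only [List.length_cons]; push_cast; omega
        rw [hn]
        apply PySem.List.foldl_congr_mem
        intro acc k _
        have hsl : PySem.List.slice (x :: y :: t) (some (0 + 1 + (k : Int))) none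
            = PySem.List.slice (y :: t) (some (0 + (k : Int))) none := by
          have h1 : (0 + 1 + (k : Int)) = (((k + 1 : Nat) : Int)) := by omega
          have h2 : (0 + (k : Int)) = ((k : Nat) : Int) := by omega
          rw [h1, h2, PySem.List.slice_from_natCast, PySem.List.slice_from_natCast]
          simp [List.drop_succ_cons]
        simp only [hsl]
      rw [hshift, ih res1]
      -- fold the i = 0 step into domFront (x :: y :: t)
      by_cases hall : ((y :: t).all (fun z => decide (z ≤ x)) = true)
      · have hx : x = (y :: t).foldl max x := hcond.mpr hall
        simp only [domFront, if_pos hall, hres1, ← hx]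
        by_cases hmem : x ∈ res
        · simp [ded, hmem]
        · simp [ded, hmem]
      · have hx : ¬ (x = (y :: t).foldl max x ∧ x ∉ res) := fun hcc => hall (hcond.mp hcc.1)
        rw [hres1, if_neg hx, show domFront (x :: y :: t) = domFront (y :: t) from by
          rw [domFront.eq_3, if_neg hall]]

-- B's first pass returns (domL arr).reverse together with the running maximum
theorem phase1_eq (arr : List Int) :
    arr.reverse.foldl (fun (p : List Int × Option Int) x =>
      match p.2 with
      | none => (p.1 ++ [x], some x)
      | some m => if m ≤ x then (p.1 ++ [x], some x) else p) ([], none)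
    = ((domL arr).reverse, maxO arr) := by
  induction arr with
  | nil => simp [domL, maxO]
  | cons x xs ih =>
    rw [List.reverse_cons, List.foldl_append, ih]
    simp only [List.foldl_cons, List.foldl_nil]
    cases hmx : maxO xs with
    | none =>
      rw [maxO_eq_none] at hmx; subst hmx
      simp [domL, maxO]
    | some m =>
      obtain ⟨hmem, hle⟩ := maxO_spec hmx
      by_cases hmx2 : m ≤ x
      · have hall : (xs.all (fun y => decide (y ≤ x))) = true := by
          simp only [List.all_eq_true, decide_eq_true_eq]
          exact fun y hy => le_trans (hle y hy) hmx2
        simp [domL, maxO, hmx, hall, hmx2]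
      · have hall : ¬ ((xs.all (fun y => decide (y ≤ x))) = true) := by
          simp only [List.all_eq_true, decide_eq_true_eq, not_forall]
          exact ⟨m, hmem, by omega⟩
        have : max x m = m := max_eq_right (by omega)
        simp [domL, maxO, hmx, hall, hmx2, this]

-- B's second pass keeps its list and its set equal, and is the dedup fold
theorem phase2_eq (l : List Int) (r : List Int) :
    l.foldl (fun (q : List Int × PySem.Set Int) x =>
      if PySem.Set.contains q.2 x then q else (q.1 ++ [x], PySem.Set.add q.2 x)) (r, r)
    = (ded r l, ded r l) := by
  induction l generalizing r with
  | nil => simp [ded]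
  | cons x t ih =>
    simp only [List.foldl_cons]
    by_cases hmem : x ∈ r
    · have hc : PySem.Set.contains r x = true := by
        simp [PySem.Set.contains, hmem]
      rw [if_pos hc, ih]
      simp [ded, hmem]
    · have hc : ¬ (PySem.Set.contains r x = true) := by
        simp [PySem.Set.contains, hmem]
      rw [if_neg hc]
      have hadd : PySem.Set.add r x = r ++ [x] := by
        simp [PySem.Set.add, PySem.Set.contains, hmem]
      rw [hadd, ih]
      simp [ded, hmem]

theorem solve_alt_eq (arr : List Int) : solve_alt arr = ded [] (domL arr) := by
  unfold solve_alt
  rw [phase1_eq]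
  simp only [List.reverse_reverse]
  rw [show (PySem.Set.empty : PySem.Set Int) = ([] : List Int) from rfl, phase2_eq]

theorem solve_eq (arr : List Int) (h : arr ≠ []) : solve arr = ded [] (domL arr) := by
  unfold solve
  rw [loopA_eq]
  rw [PySem.List.pyGet?_neg_one, List.getLast?_eq_getLast_of_ne_nil h]
  simp only
  rw [domL_eq_front arr h, ded_append]
  simp [ded]

-- ===== VERDICT (by name: the statement is the Claim_ definition above) =====
theorem solve_spec : Claim_equal_solve := by
  intro arr _ hpre
  unfold Spec_solve
  rw [solve_eq arr hpre, solve_alt_eq]
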